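-- pv_equiv track=rewrite | github.com/nayshtetik/Stasik | meaningful_content_answers.py | extract_technical_insights
-- ===== SOURCE A (Python) =====
-- def extract_technical_insights(patents):
--     """Extract actual technical content, not statistics"""
--
--     # Find patents with substantial technical content
--     airspeed_patents = []
--     mems_patents = []
--     flow_patents = []
--     pressure_patents = []
--
--     for patent in patents:
--         abstract = patent.get('abstract', '')
--         title = patent.get('title', '')
--
--         # Look for substantive technical content
--         if len(abstract) > 150:  # Good technical depth
--
--             # Airspeed/Air data systems
--             if any(term in abstract.lower() for term in ['air data', 'airspeed', 'pitot', 'pressure probe']):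
--                 airspeed_patents.append(patent)
--
--             # MEMS sensors
--             elif any(term in abstract.lower() for term in ['mems', 'microelectromechanical', 'micro sensor']):
--                 mems_patents.append(patent)
--
--             # Flow measurement
--             elif any(term in abstract.lower() for term in ['flow', 'velocity measurement', 'mass flow']):
--                 flow_patents.append(patent)
--
--             # Pressure sensing
--             elif any(term in abstract.lower() for term in ['pressure sensor', 'pressure measurement', 'differential pressure']):
--                 pressure_patents.append(patent)
--
--     return {
--         'airspeed': airspeed_patents[:3],  # Best 3 examples
--         'mems': mems_patents[:3],
--         'flow': flow_patents[:3],
--         'pressure': pressure_patents[:3]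
--     }
-- ===== SOURCE B (Python) =====
-- CATEGORY_SPECS = [
--     ('airspeed', ('air data', 'airspeed', 'pitot', 'pressure probe')),
--     ('mems', ('mems', 'microelectromechanical', 'micro sensor')),
--     ('flow', ('flow', 'velocity measurement', 'mass flow')),
--     ('pressure', ('pressure sensor', 'pressure measurement', 'differential pressure')),
-- ]
--
--
-- def _classify(patent):
--     """Label a patent with the first matching category name, or None."""
--     abstract = patent.get('abstract', '')
--     if len(abstract) <= 150:
--         return None
--     low = abstract.lower()
--     for name, terms in CATEGORY_SPECS:
--         if any(t in low for t in terms):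
--             return name
--     return None
--
--
-- def extract_technical_insights(patents):
--     """Extract actual technical content, not statistics"""
--     labels = [_classify(p) for p in patents]
--     return {name: [p for p, l in zip(patents, labels) if l == name][:3]
--             for name, _ in CATEGORY_SPECS}
-- ===== Notes on version B (the rewrite author's own statement) =====
-- stated objective: idiomatic
-- what changed: Replaces the four hand-maintained accumulator lists and the if/elif cascade by a data-driven design: an ordered table of (name, terms) specs, a classifier that labels each patent once, and a dict comprehension that builds each category list by filtering on the label.
import Mathlib
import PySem

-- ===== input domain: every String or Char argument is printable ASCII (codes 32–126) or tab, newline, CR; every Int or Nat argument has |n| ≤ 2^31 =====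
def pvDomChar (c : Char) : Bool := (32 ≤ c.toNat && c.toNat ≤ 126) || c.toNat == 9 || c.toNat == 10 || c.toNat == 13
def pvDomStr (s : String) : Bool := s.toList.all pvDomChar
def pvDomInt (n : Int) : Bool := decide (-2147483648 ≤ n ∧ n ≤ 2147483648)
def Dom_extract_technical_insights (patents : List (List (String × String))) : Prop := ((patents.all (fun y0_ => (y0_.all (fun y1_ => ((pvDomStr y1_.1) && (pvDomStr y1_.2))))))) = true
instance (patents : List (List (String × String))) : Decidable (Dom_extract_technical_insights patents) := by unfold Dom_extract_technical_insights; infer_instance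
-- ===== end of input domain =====

-- B replaces A's four accumulator lists and if/elif cascade by an ordered (name, terms) spec
-- table, a per-patent classifier, and per-category filters (objective: idiomatic / data-driven).

-- dict.get(k, "") on an association list: first match, default "" (shared by both ports)
def pvGet (p : List (String × String)) (k : String) : String :=
  match p.find? (fun kv => kv.1 == k) with
  | some kv => kv.2
  | none => ""

-- ===== PORT A =====
-- the body of A's for-loop: the if/elif cascade over the four accumulator lists
def pvStepA (st : List (List (String × String)) × List (List (String × String)) ×
    List (List (String × String)) × List (List (String × String)))
    (patent : List (String × String)) :
    List (List (String × String)) × List (List (String × String)) ×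
    List (List (String × String)) × List (List (String × String)) :=
  let abstract := pvGet patent "abstract"
  let _title := pvGet patent "title"
  if PySem.Str.len abstract > 150 then
    if ["air data", "airspeed", "pitot", "pressure probe"].any
        (fun t => PySem.Str.isIn t (PySem.Str.lower abstract)) then
      (st.1 ++ [patent], st.2.1, st.2.2.1, st.2.2.2)
    else if ["mems", "microelectromechanical", "micro sensor"].any
        (fun t => PySem.Str.isIn t (PySem.Str.lower abstract)) then
      (st.1, st.2.1 ++ [patent], st.2.2.1, st.2.2.2)
    else if ["flow", "velocity measurement", "mass flow"].any
        (fun t => PySem.Str.isIn t (PySem.Str.lower abstract)) then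
      (st.1, st.2.1, st.2.2.1 ++ [patent], st.2.2.2)
    else if ["pressure sensor", "pressure measurement", "differential pressure"].any
        (fun t => PySem.Str.isIn t (PySem.Str.lower abstract)) then
      (st.1, st.2.1, st.2.2.1, st.2.2.2 ++ [patent])
    else st
  else st

def extract_technical_insights (patents : List (List (String × String))) :
    List (String × List (List (String × String))) :=
  let r := patents.foldl pvStepA ([], [], [], [])
  [("airspeed", r.1.take 3), ("mems", r.2.1.take 3),
   ("flow", r.2.2.1.take 3), ("pressure", r.2.2.2.take 3)]

-- ===== PORT B =====
-- CATEGORY_SPECS from Source B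
def pvSpecs : List (String × List String) :=
  [("airspeed", ["air data", "airspeed", "pitot", "pressure probe"]),
   ("mems", ["mems", "microelectromechanical", "micro sensor"]),
   ("flow", ["flow", "velocity measurement", "mass flow"]),
   ("pressure", ["pressure sensor", "pressure measurement", "differential pressure"])]

-- _classify from Source B: first spec whose terms hit, via find? (= the for/return loop)
def pvClassify (patent : List (String × String)) : Option String :=
  let abstract := pvGet patent "abstract"
  if PySem.Str.len abstract ≤ 150 then none
  else
    let low := PySem.Str.lower abstract
    match pvSpecs.find? (fun spec => spec.2.any (fun t => PySem.Str.isIn t low)) with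
    | some spec => some spec.1
    | none => none

def extract_technical_insights_alt (patents : List (List (String × String))) :
    List (String × List (List (String × String))) :=
  let labels := patents.map pvClassify
  pvSpecs.map (fun spec =>
    (spec.1, (((patents.zip labels).filter (fun pl => pl.2 == some spec.1)).map Prod.fst).take 3))

-- ===== PRECONDITION & SPEC =====
def Spec_extract_technical_insights (patents : List (List (String × String))) (out : List (String × List (List (String × String)))) : Prop := out = extract_technical_insights_alt patents
instance (patents : List (List (String × String))) (out : List (String × List (List (String × String)))) : Decidable (Spec_extract_technical_insights patents out) := by unfold Spec_extract_technical_insights; infer_instance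

-- ===== CLAIM (what is proved, stated in full; the proofs are below) =====
def Claim_equal_extract_technical_insights : Prop := ∀ (patents : List (List (String × String))), Dom_extract_technical_insights patents → Spec_extract_technical_insights patents (extract_technical_insights patents)

-- ===== LEMMAS AND PROOFS =====

-- zip-with-labels filter = direct filter on the label
theorem pv_zip_filter (xs : List (List (String × String))) (v : String) :
    (((xs.zip (xs.map pvClassify)).filter (fun pl => pl.2 == some v)).map Prod.fst)
      = xs.filter (fun x => pvClassify x == some v) := by
  induction xs with
  | nil => simp
  | cons x xs ih =>
    simp only [List.map_cons, List.zip_cons_cons, List.filter_cons]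
    by_cases h : (pvClassify x == some v) = true
    · simp [h, ih]
    · simp [h, ih]

-- A's loop body, characterised through B's classifier
theorem pv_stepA_classify (st : List (List (String × String)) × List (List (String × String)) ×
    List (List (String × String)) × List (List (String × String)))
    (q : List (String × String)) :
    pvStepA st q =
      (st.1 ++ if pvClassify q == some "airspeed" then [q] else [],
       st.2.1 ++ if pvClassify q == some "mems" then [q] else [],
       st.2.2.1 ++ if pvClassify q == some "flow" then [q] else [],
       st.2.2.2 ++ if pvClassify q == some "pressure" then [q] else []) := by
  unfold pvStepA pvClassify pvSpecs
  simp only [List.find?]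
  by_cases hlen : PySem.Str.len (pvGet q "abstract") > 150
  · rw [if_pos hlen, if_neg (by omega : ¬ PySem.Str.len (pvGet q "abstract") ≤ 150)]
    cases h1 : (["air data", "airspeed", "pitot", "pressure probe"].any
        fun t => PySem.Str.isIn t (PySem.Str.lower (pvGet q "abstract"))) <;>
      cases h2 : (["mems", "microelectromechanical", "micro sensor"].any
        fun t => PySem.Str.isIn t (PySem.Str.lower (pvGet q "abstract"))) <;>
      cases h3 : (["flow", "velocity measurement", "mass flow"].any
        fun t => PySem.Str.isIn t (PySem.Str.lower (pvGet q "abstract"))) <;>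
      cases h4 : (["pressure sensor", "pressure measurement", "differential pressure"].any
        fun t => PySem.Str.isIn t (PySem.Str.lower (pvGet q "abstract"))) <;>
      simp only [h1, h2, h3, h4] <;> simp
  · rw [if_neg hlen, if_pos (by omega : PySem.Str.len (pvGet q "abstract") ≤ 150)]
    simp

-- the fold accumulates exactly the four label-filters
theorem pv_fold_filter (patents : List (List (String × String)))
    (a m f p : List (List (String × String))) :
    patents.foldl pvStepA (a, m, f, p) =
      (a ++ patents.filter (fun x => pvClassify x == some "airspeed"),
       m ++ patents.filter (fun x => pvClassify x == some "mems"),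
       f ++ patents.filter (fun x => pvClassify x == some "flow"),
       p ++ patents.filter (fun x => pvClassify x == some "pressure")) := by
  induction patents generalizing a m f p with
  | nil => simp
  | cons q qs ih =>
    simp only [List.foldl_cons, pv_stepA_classify, ih, List.filter_cons]
    refine Prod.ext ?_ (Prod.ext ?_ (Prod.ext ?_ ?_)) <;>
      · simp only []
        split <;> simp

-- ===== VERDICT (by name: the statement is the Claim_ definition above) =====
theorem extract_technical_insights_spec : Claim_equal_extract_technical_insights := by
  intro patents _
  show _ = _
  unfold extract_technical_insights extract_technical_insights_alt
  simp only [pv_fold_filter, List.nil_append, pvSpecs, List.map_cons, List.map_nil,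
    pv_zip_filter]
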